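-- pv_equiv track=rewrite | github.com/MekaMdan/IIA | Projetos/Projeto 1/genetic_model.py | metodo_de_selecao
-- ===== SOURCE A (Python) =====
-- def metodo_de_selecao(fitness_resultados, numero_de_selecionados, geracao):
--     individuos_selecionados = geracao[:]
--     fitness_selecionados = fitness_resultados[:]
--
--     for iteracao in range(len(geracao) - numero_de_selecionados):
--         indice_a_remover = fitness_selecionados.index(max(fitness_selecionados))
--         individuos_selecionados.pop(indice_a_remover)
--         fitness_selecionados.pop(indice_a_remover)
--
--     return individuos_selecionados
-- ===== SOURCE B (Python) =====
-- def metodo_de_selecao(fitness_resultados, numero_de_selecionados, geracao):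
--     n = len(geracao)
--     m = n - numero_de_selecionados
--     if m <= 0:
--         return geracao[:]
--     order = sorted(range(n), key=lambda i: (-fitness_resultados[i], i))
--     removed = set(order[:m])
--     return [geracao[i] for i in range(n) if i not in removed]
-- ===== Notes on version B (the rewrite author's own statement) =====
-- stated objective: faster
-- what changed: Instead of repeatedly scanning for the max and popping it (n-k) times, B sorts the indices once by (-fitness, index), marks the top (n-k) as removed, and keeps the survivors in one pass in original order.
-- outside the precondition, e.g. on metodo_de_selecao([5], 1, [10, 20]): A returns [20], B raises IndexError
import Mathlib
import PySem

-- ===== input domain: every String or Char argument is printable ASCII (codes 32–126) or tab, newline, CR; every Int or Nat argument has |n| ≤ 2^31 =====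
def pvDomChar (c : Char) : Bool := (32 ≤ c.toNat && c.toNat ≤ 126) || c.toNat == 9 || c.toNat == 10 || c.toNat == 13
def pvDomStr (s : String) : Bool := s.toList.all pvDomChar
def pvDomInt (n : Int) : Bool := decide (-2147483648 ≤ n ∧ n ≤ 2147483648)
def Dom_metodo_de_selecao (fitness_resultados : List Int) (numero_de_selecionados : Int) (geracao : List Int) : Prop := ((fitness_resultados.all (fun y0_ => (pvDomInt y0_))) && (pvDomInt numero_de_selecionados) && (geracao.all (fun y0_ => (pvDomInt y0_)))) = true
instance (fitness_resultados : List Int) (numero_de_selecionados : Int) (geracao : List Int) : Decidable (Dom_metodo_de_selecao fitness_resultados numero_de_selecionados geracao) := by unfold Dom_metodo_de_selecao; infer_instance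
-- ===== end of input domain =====

-- B replaces A's repeated scan-for-max-and-pop loop by one sort of the indices by
-- (-fitness, index) followed by a single filtering pass (objective: faster).


-- ===== PORT A =====
-- one iteration of A's loop on the state (individuos_selecionados, fitness_selecionados);
-- the `none` fallbacks are the points where the Python raises (max/index/pop), excluded by Pre_
def pvStepA (st : List Int × List Int) : List Int × List Int :=
  match PySem.List.max? st.2 (fun y => y) with
  | none => st
  | some mx =>
    match PySem.List.index? st.2 mx with
    | none => st
    | some idx =>
      match PySem.List.pop? st.1 (idx : Int), PySem.List.pop? st.2 (idx : Int) with
      | some p, some q => (p.2, q.2)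
      | _, _ => st

-- `for iteracao in range(len(geracao) - numero_de_selecionados)` as structural recursion
def pvLoopA : Nat → List Int × List Int → List Int × List Int
  | 0, st => st
  | t+1, st => pvLoopA t (pvStepA st)

def metodo_de_selecao (fitness_resultados : List Int) (numero_de_selecionados : Int) (geracao : List Int) : List Int :=
  (pvLoopA ((geracao.length : Int) - numero_de_selecionados).toNat (geracao, fitness_resultados)).1

-- ===== PORT B =====
def metodo_de_selecao_alt (fitness_resultados : List Int) (numero_de_selecionados : Int) (geracao : List Int) : List Int :=
  let n : Int := geracao.length
  let m : Int := n - numero_de_selecionados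
  if m ≤ 0 then geracao
  else
    let order : List Int := PySem.List.sorted2 (PySem.List.pyRange 0 n)
      (fun i => -(PySem.List.pyGetD fitness_resultados i 0)) (fun i => i)
    let removed : PySem.Set Int := PySem.Set.ofList (PySem.List.slice order none (some m))
    ((PySem.List.pyRange 0 n).filter (fun i => !(PySem.Set.contains removed i))).map
      (fun i => PySem.List.pyGetD geracao i 0)

-- ===== PRECONDITION & SPEC =====
-- Pre_ excludes inputs where the lists have different lengths or numero_de_selecionados is
-- negative while the removal loop runs: there A's pairing of the fitness index with the
-- individuals list raises (max of empty list / pop out of range) or is accidental.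
def Pre_metodo_de_selecao (fitness_resultados : List Int) (numero_de_selecionados : Int) (geracao : List Int) : Prop :=
  ((geracao.length : Int) - numero_de_selecionados ≤ 0) ∨
    (fitness_resultados.length = geracao.length ∧ 0 ≤ numero_de_selecionados)
instance (fitness_resultados : List Int) (numero_de_selecionados : Int) (geracao : List Int) : Decidable (Pre_metodo_de_selecao fitness_resultados numero_de_selecionados geracao) := by unfold Pre_metodo_de_selecao; infer_instance

def pvWitness_metodo_de_selecao : List Int × Int × List Int := ([3, 1, 2], 2, [10, 20, 30])

def Spec_metodo_de_selecao (fitness_resultados : List Int) (numero_de_selecionados : Int) (geracao : List Int) (out : List Int) : Prop := out = metodo_de_selecao_alt fitness_resultados numero_de_selecionados geracao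
instance (fitness_resultados : List Int) (numero_de_selecionados : Int) (geracao : List Int) (out : List Int) : Decidable (Spec_metodo_de_selecao fitness_resultados numero_de_selecionados geracao out) := by unfold Spec_metodo_de_selecao; infer_instance

-- ===== CLAIM (what is proved, stated in full; the proofs are below) =====
def Claim_equal_metodo_de_selecao : Prop := ∀ (fitness_resultados : List Int) (numero_de_selecionados : Int) (geracao : List Int), Dom_metodo_de_selecao fitness_resultados numero_de_selecionados geracao → Pre_metodo_de_selecao fitness_resultados numero_de_selecionados geracao → Spec_metodo_de_selecao fitness_resultados numero_de_selecionados geracao (metodo_de_selecao fitness_resultados numero_de_selecionados geracao)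

-- ===== LEMMAS AND PROOFS =====

-- The common intermediary: index j of the original lists survives iff fewer than m indices
-- precede it in the removal order, i.e. iff its "rank" under the strict order
-- (fitness descending, index ascending) is ≥ m.

-- the annotated element of index j : its fitness value together with j
def pvElt (f : List Int) (j : Nat) : Int × Nat := (f.getD j 0, j)

-- the annotated list
def pvW (f : List Int) (n : Nat) : List (Int × Nat) := (List.range n).map (pvElt f)

-- strict removal order: x is removed before y
def pvLT (x y : Int × Nat) : Bool :=
  decide (y.1 < x.1) || (decide (x.1 = y.1) && decide (x.2 < y.2))

-- how many elements are removed before x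
def pvRank (f : List Int) (n : Nat) (x : Int × Nat) : Nat :=
  ((pvW f n).filter (fun a => pvLT a x)).length

-- the survivors after t removals
def pvSel (f : List Int) (n t : Nat) : List (Int × Nat) :=
  (pvW f n).filter (fun x => decide (t ≤ pvRank f n x))

-- the Int-index version of the removal order, as B's sort sees it
def pvILT (f : List Int) (a c : Int) : Bool :=
  decide (PySem.List.pyGetD f c 0 < PySem.List.pyGetD f a 0) ||
    (decide (PySem.List.pyGetD f a 0 = PySem.List.pyGetD f c 0) && decide (a < c))

-- ---- basic order facts ----
theorem pvLT_irrefl (x : Int × Nat) : pvLT x x = false := by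
  simp [pvLT]

theorem pvLT_trans {x y z : Int × Nat} (h1 : pvLT x y = true) (h2 : pvLT y z = true) :
    pvLT x z = true := by
  simp [pvLT] at *; omega

theorem pvLT_total {x y : Int × Nat} (h : x.2 ≠ y.2) :
    pvLT x y = true ∨ pvLT y x = true := by
  simp [pvLT]; omega

-- ---- facts about pvW ----
theorem pvW_length (f : List Int) (n : Nat) : (pvW f n).length = n := by
  simp [pvW]

theorem pvW_pairwise_snd (f : List Int) (n : Nat) :
    (pvW f n).Pairwise (fun a b => a.2 < b.2) := by
  exact List.Pairwise.map _ (fun a b h => by simp [pvElt]; omega) List.pairwise_lt_range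

theorem pvW_nodup (f : List Int) (n : Nat) : (pvW f n).Nodup := by
  exact (pvW_pairwise_snd f n).imp (fun h => by intro he; rw [he] at h; omega)

theorem mem_pvW {f : List Int} {n : Nat} {x : Int × Nat} (h : x ∈ pvW f n) :
    x.2 < n ∧ x = pvElt f x.2 := by
  simp [pvW] at h
  obtain ⟨j, hj, he⟩ := h
  subst he; exact ⟨hj, rfl⟩

theorem pvW_snd_inj {f : List Int} {n : Nat} {x y : Int × Nat}
    (hx : x ∈ pvW f n) (hy : y ∈ pvW f n) (hne : x ≠ y) : x.2 ≠ y.2 := by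
  intro he
  exact hne ((mem_pvW hx).2.trans (by rw [he, ← (mem_pvW hy).2]))

-- ---- a generic strict-filter-length lemma ----
theorem pv_len_filter_lt {α : Type} (P Q : α → Bool) (l : List α)
    (h : ∀ a ∈ l, P a = true → Q a = true) (x : α) (hx : x ∈ l)
    (hQ : Q x = true) (hP : P x = false) :
    (l.filter P).length < (l.filter Q).length := by
  induction l with
  | nil => cases hx
  | cons a t ih =>
    have hle : (t.filter P).length ≤ (t.filter Q).length := by
      rw [← List.countP_eq_length_filter, ← List.countP_eq_length_filter]
      exact List.countP_mono_left (fun b hb => h b (List.mem_cons_of_mem _ hb))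
    rw [List.filter_cons, List.filter_cons]
    rcases List.mem_cons.mp hx with rfl | hxt
    · rw [hP, hQ]; simp; omega
    · have ih' := ih (fun b hb => h b (List.mem_cons_of_mem _ hb)) hxt
      cases hPa : P a
      · cases hQa : Q a <;> simp <;> omega
      · rw [h a List.mem_cons_self hPa]; simp; omega

-- ---- rank facts ----
theorem pvRank_lt_of_LT {f : List Int} {n : Nat} {x y : Int × Nat}
    (hx : x ∈ pvW f n) (hy : y ∈ pvW f n) (h : pvLT x y = true) :
    pvRank f n x < pvRank f n y := by
  exact pv_len_filter_lt (fun a => pvLT a x) (fun a => pvLT a y) (pvW f n)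
    (fun a _ hp => pvLT_trans hp h) x hx h (pvLT_irrefl x)

theorem pvLT_iff_rank_lt {f : List Int} {n : Nat} {x y : Int × Nat}
    (hx : x ∈ pvW f n) (hy : y ∈ pvW f n) :
    (pvLT x y = true ↔ pvRank f n x < pvRank f n y) := by
  constructor
  · exact pvRank_lt_of_LT hx hy
  · intro hr
    by_cases hxy : x = y
    · subst hxy; omega
    · rcases pvLT_total (pvW_snd_inj hx hy hxy) with h | h
      · exact h
      · exact absurd (pvRank_lt_of_LT hy hx h) (by omega)

theorem pvRank_inj {f : List Int} {n : Nat} {x y : Int × Nat}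
    (hx : x ∈ pvW f n) (hy : y ∈ pvW f n) (h : pvRank f n x = pvRank f n y) : x = y := by
  by_contra hne
  rcases pvLT_total (pvW_snd_inj hx hy hne) with hl | hl
  · exact absurd (pvRank_lt_of_LT hx hy hl) (by omega)
  · exact absurd (pvRank_lt_of_LT hy hx hl) (by omega)

theorem pvRank_lt_n {f : List Int} {n : Nat} {x : Int × Nat} (hx : x ∈ pvW f n) :
    pvRank f n x < n := by
  have := pv_len_filter_lt (fun a => pvLT a x) (fun _ => true) (pvW f n)
    (fun a _ _ => rfl) x hx rfl (pvLT_irrefl x)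
  simpa [pvRank, pvW_length] using this

theorem pvRank_surj {f : List Int} {n : Nat} {t : Nat} (ht : t < n) :
    ∃ x ∈ pvW f n, pvRank f n x = t := by
  classical
  have hmapnd : ((pvW f n).map (pvRank f n)).Nodup :=
    List.Nodup.map_on (fun x hx y hy hxy => pvRank_inj hx hy hxy) (pvW_nodup f n)
  have hsub : ((pvW f n).map (pvRank f n)).toFinset ⊆ Finset.range n := by
    intro u hu
    rw [List.mem_toFinset, List.mem_map] at hu
    obtain ⟨x, hxW, hxr⟩ := hu
    exact Finset.mem_range.mpr (hxr ▸ pvRank_lt_n hxW)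
  have hcard : (Finset.range n).card ≤ ((pvW f n).map (pvRank f n)).toFinset.card := by
    rw [List.toFinset_card_of_nodup hmapnd, Finset.card_range, List.length_map, pvW_length]
  have heq := Finset.eq_of_subset_of_card_le hsub hcard
  have htmem : t ∈ ((pvW f n).map (pvRank f n)).toFinset := by
    rw [heq]; exact Finset.mem_range.mpr ht
  rw [List.mem_toFinset, List.mem_map] at htmem
  obtain ⟨x, hxW, hxr⟩ := htmem
  exact ⟨x, hxW, hxr⟩

-- ---- A-side ----
theorem pvSel_zero (f : List Int) (n : Nat) : pvSel f n 0 = pvW f n := by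
  unfold pvSel
  simp

theorem pv_map_getD_range {α : Type} (l : List α) (d : α) :
    (List.range l.length).map (fun j => l.getD j d) = l := by
  apply List.ext_getElem
  · simp
  · intro i h1 h2
    simp [List.getD, List.getElem?_eq_getElem h2]

theorem pv_eraseIdx_eq_filter {α : Type} [DecidableEq α] (e : α) :
    ∀ (l : List α) (p : Nat), l.Nodup → l[p]? = some e →
      l.eraseIdx p = l.filter (fun x => x ≠ e) := by
  intro l
  induction l with
  | nil => intro p _ he; simp at he
  | cons a t ih =>
    intro p hnd he
    cases p with
    | zero =>
      simp only [List.getElem?_cons_zero, Option.some.injEq] at he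
      subst he
      have hnotin : a ∉ t := (List.nodup_cons.mp hnd).1
      rw [List.eraseIdx_cons_zero, List.filter_cons]
      simp only [ne_eq, not_true_eq_false, decide_false, Bool.false_eq_true, if_false]
      exact (List.filter_eq_self.mpr (fun b hb => by
        simp only [decide_eq_true_eq]
        exact fun hba => hnotin (hba ▸ hb))).symm
    | succ p =>
      simp only [List.getElem?_cons_succ] at he
      have hin : e ∈ t := by
        rcases List.getElem?_eq_some_iff.mp he with ⟨hlt, hEq⟩
        exact hEq ▸ List.getElem_mem _
      have hat : a ≠ e := fun hae => (List.nodup_cons.mp hnd).1 (hae ▸ hin)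
      rw [List.eraseIdx_cons_succ, List.filter_cons]
      simp only [ne_eq, hat, not_false_eq_true, decide_true, if_true]
      rw [ih p (List.nodup_cons.mp hnd).2 he]

theorem pvStepA_sel (f g : List Int) (n t : Nat) (ht : t < n) :
    pvStepA ((pvSel f n t).map (fun x => g.getD x.2 0), (pvSel f n t).map (fun x => x.1))
      = ((pvSel f n (t+1)).map (fun x => g.getD x.2 0), (pvSel f n (t+1)).map (fun x => x.1)) := by
  obtain ⟨e, heW, heRank⟩ := pvRank_surj (f := f) ht
  set cs := pvSel f n t with hc
  have heC : e ∈ cs := by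
    rw [hc]; unfold pvSel
    exact List.mem_filter.mpr ⟨heW, by simp [heRank]⟩
  have hcsub : ∀ x ∈ cs, x ∈ pvW f n := by
    intro x hx; rw [hc] at hx; unfold pvSel at hx; exact (List.mem_filter.mp hx).1
  have hcnd : cs.Nodup := by
    rw [hc]; unfold pvSel; exact List.Nodup.filter _ (pvW_nodup f n)
  have hcsnd : cs.Pairwise (fun a b => a.2 < b.2) := by
    rw [hc]; unfold pvSel; exact List.Pairwise.filter _ (pvW_pairwise_snd f n)
  have hmin : ∀ x ∈ cs, x ≠ e → pvLT e x = true := by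
    intro x hx hne
    have hxW := hcsub x hx
    have hrx : t ≤ pvRank f n x := by
      rw [hc] at hx; unfold pvSel at hx
      simpa using (List.mem_filter.mp hx).2
    have hrne : pvRank f n x ≠ t := fun hEq => hne (pvRank_inj hxW heW (hEq.trans heRank.symm))
    exact (pvLT_iff_rank_lt heW hxW).mpr (by omega)
  have hcne : cs ≠ [] := List.ne_nil_of_mem heC
  have hfne : cs.map (fun x => x.1) ≠ [] := by simpa using hcne
  obtain ⟨v, hv⟩ : ∃ v, PySem.List.max? (cs.map (fun x => x.1)) (fun y => y) = some v := by
    cases hmx : PySem.List.max? (cs.map (fun x => x.1)) (fun y => y) with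
    | none => exact absurd ((PySem.List.max?_eq_none_iff _ _).mp hmx) hfne
    | some v => exact ⟨v, rfl⟩
  have hvmem := PySem.List.max?_mem hv
  have hvmax := PySem.List.max?_isMax hv
  have hve : v = e.1 := by
    obtain ⟨x, hxc, hxv⟩ := List.mem_map.mp hvmem
    have h1 : e.1 ≤ v := hvmax e.1 (List.mem_map_of_mem heC)
    have h2 : v ≤ e.1 := by
      by_cases hxe : x = e
      · subst hxe; omega
      · have := hmin x hxc hxe
        simp only [pvLT, Bool.or_eq_true, Bool.and_eq_true, decide_eq_true_eq] at this
        omega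
    omega
  subst hve
  have hmemfst : e.1 ∈ cs.map (fun x => x.1) := List.mem_map_of_mem heC
  obtain ⟨p, hpidx⟩ : ∃ p, PySem.List.index? (cs.map (fun x => x.1)) e.1 = some p := by
    cases hidx : PySem.List.index? (cs.map (fun x => x.1)) e.1 with
    | none =>
      have := (PySem.List.index?_isSome_iff (cs.map (fun x => x.1)) e.1).mpr hmemfst
      rw [hidx] at this; simp at this
    | some p => exact ⟨p, rfl⟩
  obtain ⟨hplen, hpval, hpmin⟩ := PySem.List.getElem_of_index?_eq_some hpidx
  have hplen' : p < cs.length := by simpa using hplen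
  obtain ⟨q, hq, hqe⟩ := List.getElem_of_mem heC
  have hqp : ¬ (q < p) := by
    intro hlt
    exact hpmin q hlt (by simp [hqe])
  have hpq : ¬ (p < q) := by
    intro hlt
    have hxne : cs[p] ≠ e := by
      intro hEq; rw [← hqe] at hEq
      exact absurd ((List.Nodup.getElem_inj_iff hcnd).mp hEq) (by omega)
    have hlte := hmin _ (List.getElem_mem hplen') hxne
    have hfst : (cs[p]).1 = e.1 := by simpa using hpval
    have hsnd : (cs[p]).2 < e.2 := by
      have h3 := List.pairwise_iff_getElem.mp hcsnd p q hplen' hq hlt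
      rw [hqe] at h3; exact h3
    simp only [pvLT, hfst, Bool.or_eq_true, Bool.and_eq_true, decide_eq_true_eq] at hlte
    omega
  have hpe : cs[p]'hplen' = e := by
    have hpqe : p = q := by omega
    subst hpqe; exact hqe
  have hglen : p < (cs.map (fun x => g.getD x.2 0)).length := by simpa using hplen'
  have hpopg := PySem.List.pop?_natCast (cs.map (fun x => g.getD x.2 0)) p hglen
  have hpopf := PySem.List.pop?_natCast (cs.map (fun x => x.1)) p hplen
  have herase : cs.eraseIdx p = pvSel f n (t+1) := by
    rw [pv_eraseIdx_eq_filter e cs p hcnd (by rw [List.getElem?_eq_getElem hplen', hpe])]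
    rw [hc]; unfold pvSel
    rw [List.filter_filter]
    refine List.filter_congr ?_
    intro x hxW
    by_cases hxe : x = e
    · subst hxe
      simp only [ne_eq, not_true_eq_false, decide_false, Bool.false_and, heRank]
      symm
      rw [decide_eq_false_iff_not]
      omega
    · have hrne : pvRank f n x ≠ t := fun hEq => hxe (pvRank_inj hxW heW (by rw [hEq, heRank]))
      simp only [ne_eq, hxe, not_false_eq_true, decide_true, Bool.true_and]
      exact decide_eq_decide.mpr (by omega)
  simp only [pvStepA, hv, hpidx, hpopg, hpopf]
  rw [List.eraseIdx_map, List.eraseIdx_map, herase]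

theorem pvLoopA_sel (f g : List Int) (n : Nat) :
    ∀ (s t : Nat), t + s ≤ n →
    pvLoopA s ((pvSel f n t).map (fun x => g.getD x.2 0), (pvSel f n t).map (fun x => x.1))
      = ((pvSel f n (t+s)).map (fun x => g.getD x.2 0), (pvSel f n (t+s)).map (fun x => x.1)) := by
  intro s
  induction s with
  | zero => intro t h; rfl
  | succ s ih =>
    intro t h
    simp only [pvLoopA]
    rw [pvStepA_sel f g n t (by omega), ih (t+1) (by omega)]
    have hts : t + 1 + s = t + (s+1) := by omega
    rw [hts]

theorem pvA_eq (f g : List Int) (k : Int) (hf : f.length = g.length) (hk : 0 ≤ k) :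
    metodo_de_selecao f k g
      = (pvSel f g.length ((g.length : Int) - k).toNat).map (fun x => g.getD x.2 0) := by
  unfold metodo_de_selecao
  have hg0 : (pvSel f g.length 0).map (fun x => g.getD x.2 0) = g := by
    rw [pvSel_zero]
    unfold pvW
    rw [List.map_map]
    refine Eq.trans ?_ (pv_map_getD_range g 0)
    refine List.map_congr_left ?_
    intro j hj
    simp [pvElt, Function.comp]
  have hf0 : (pvSel f g.length 0).map (fun x => x.1) = f := by
    rw [pvSel_zero]
    unfold pvW
    rw [List.map_map]
    have h2 := pv_map_getD_range f 0
    rw [hf] at h2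
    refine Eq.trans ?_ h2
    refine List.map_congr_left ?_
    intro j hj
    simp [pvElt, Function.comp]
  have h0 := pvLoopA_sel f g g.length (((g.length : Int) - k).toNat) 0 (by omega)
  rw [hg0, hf0] at h0
  rw [h0]
  simp

-- ---- B-side ----
-- insertBy preserves "no later element must come before an earlier one"
theorem pv_insertBy_pairwise {α : Type} (b : α → α → Bool)
    (hasym : ∀ x y, b x y = true → b y x = false)
    (htr : ∀ x y w, b x y = true → b w y = false → b w x = false)
    (x : α) (ys : List α) (h : ys.Pairwise (fun a z => b z a = false)) :
    (PySem.List.insertBy b x ys).Pairwise (fun a z => b z a = false) := by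
  induction ys with
  | nil => simp [PySem.List.insertBy]
  | cons y ys ih =>
    rw [PySem.List.insertBy]
    by_cases hxy : b x y = true
    · rw [if_pos hxy]
      refine List.pairwise_cons.mpr ⟨?_, h⟩
      intro z hz
      rcases List.mem_cons.mp hz with rfl | hzys
      · exact hasym x z hxy
      · exact htr x y z hxy ((List.pairwise_cons.mp h).1 z hzys)
    · rw [if_neg hxy]
      refine List.pairwise_cons.mpr ⟨?_, ih (List.pairwise_cons.mp h).2⟩
      intro z hz
      rcases (PySem.List.insertBy_mem_iff b x z ys).mp hz with rfl | hzys
      · exact (Bool.not_eq_true _).mp hxy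
      · exact (List.pairwise_cons.mp h).1 z hzys

theorem pv_foldl_insertBy_pairwise {α : Type} (b : α → α → Bool)
    (hasym : ∀ x y, b x y = true → b y x = false)
    (htr : ∀ x y w, b x y = true → b w y = false → b w x = false)
    (xs : List α) : ∀ (acc : List α), acc.Pairwise (fun a z => b z a = false) →
    (xs.foldl (fun acc x => PySem.List.insertBy b x acc) acc).Pairwise
      (fun a z => b z a = false) := by
  induction xs with
  | nil => intro acc h; simpa using h
  | cons x xs ih =>
    intro acc h
    simp only [List.foldl_cons]
    exact ih _ (pv_insertBy_pairwise b hasym htr x acc h)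

-- j ∈ l.take M ↔ fewer than M elements of l precede j, for a strictly R-sorted l
theorem pv_sorted2_int_pairwise {α : Type} (xs : List α) (k1 k2 : α → Int) :
    (PySem.List.sorted2 xs k1 k2).Pairwise (fun a z =>
      (decide (k1 z < k1 a) || (!decide (k1 a < k1 z) && decide (k2 z < k2 a))) = false) := by
  refine pv_foldl_insertBy_pairwise
    (fun a z => decide (k1 a < k1 z) || (!decide (k1 z < k1 a) && decide (k2 a < k2 z)))
    ?_ ?_ xs [] List.Pairwise.nil
  · intro x y h
    simp only [Bool.or_eq_true, Bool.and_eq_true, Bool.not_eq_true', decide_eq_true_eq,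
      decide_eq_false_iff_not, Bool.or_eq_false_iff, Bool.and_eq_false_iff,
      Bool.not_eq_false', not_lt] at *
    omega
  · intro x y w h1 h2
    simp only [Bool.or_eq_true, Bool.and_eq_true, Bool.not_eq_true', decide_eq_true_eq,
      decide_eq_false_iff_not, Bool.or_eq_false_iff, Bool.and_eq_false_iff,
      Bool.not_eq_false', not_lt] at *
    omega

theorem pv_take_mem {α : Type} [DecidableEq α] (R : α → α → Bool)
    (hasym : ∀ x y, R x y = true → R y x = false)
    (hirr : ∀ a, R a a = false) :
    ∀ (l : List α), l.Pairwise (fun a z => R a z = true) →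
      ∀ j ∈ l, ∀ M : Nat, (j ∈ l.take M ↔ (l.filter (fun a => R a j)).length < M) := by
  intro l
  induction l with
  | nil => intro _ j hj; cases hj
  | cons x t ih =>
    intro hp j hj M
    have hhead := (List.pairwise_cons.mp hp).1
    have htail := (List.pairwise_cons.mp hp).2
    have hxnotint : x ∉ t := fun hxt => by
      have hc := hhead x hxt
      rw [hirr] at hc
      exact Bool.false_ne_true hc
    rcases List.mem_cons.mp hj with rfl | hjt
    · have hfilt : (j :: t).filter (fun a => R a j) = [] := by
        rw [List.filter_cons, hirr j]
        simp only [Bool.false_eq_true, if_false]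
        rw [List.filter_eq_nil_iff]
        intro a ha
        simp [hasym j a (hhead a ha)]
      rw [hfilt]
      cases M with
      | zero => simp
      | succ M => simp [List.take_succ_cons]
    · have hRxj : R x j = true := hhead j hjt
      have hjx : j ≠ x := fun hEq => hxnotint (hEq ▸ hjt)
      rw [List.filter_cons, hRxj]
      simp only [if_true]
      cases M with
      | zero => simp
      | succ M =>
        rw [List.take_succ_cons]
        have hih := ih htail j hjt M
        simp only [List.mem_cons, hjx, false_or, List.length_cons]
        constructor
        · intro hm
          have := hih.mp hm
          omega
        · intro hlt
          exact hih.mpr (by omega)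

theorem pvB_eq (f g : List Int) (k : Int)
    (hm : 0 < (g.length : Int) - k) :
    metodo_de_selecao_alt f k g
      = (pvSel f g.length ((g.length : Int) - k).toNat).map (fun x => g.getD x.2 0) := by
  have hnn : ¬ ((g.length : Int) - k ≤ 0) := by omega
  unfold metodo_de_selecao_alt
  simp only [if_neg hnn]
  rw [PySem.List.slice_to _ (by omega : (0:Int) ≤ (g.length : Int) - k)]
  set ord := PySem.List.sorted2 (PySem.List.pyRange 0 ((g.length : Int)))
    (fun i => -(PySem.List.pyGetD f i 0)) (fun i => i) with hord
  have hpair0 : ord.Pairwise (fun a z =>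
      (decide (-(PySem.List.pyGetD f z 0) < -(PySem.List.pyGetD f a 0)) ||
        (!decide (-(PySem.List.pyGetD f a 0) < -(PySem.List.pyGetD f z 0)) && decide (z < a))) = false) := by
    rw [hord]
    exact pv_sorted2_int_pairwise _ _ _
  have hperm : ord.Perm (PySem.List.pyRange 0 ((g.length : Int))) := by
    rw [hord]
    exact PySem.List.sorted2_perm _ _ _ _
  have hnd : ord.Nodup := hperm.nodup_iff.mpr (PySem.List.nodup_pyRange_one 0 _)
  have hpILT : ord.Pairwise (fun a z => pvILT f a z = true) := by
    refine (List.Pairwise.and hpair0 hnd).imp ?_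
    intro a z hz
    obtain ⟨h1, h2⟩ := hz
    simp only [Bool.or_eq_false_iff, Bool.and_eq_false_iff, Bool.not_eq_false',
      decide_eq_false_iff_not, decide_eq_true_eq, not_lt] at h1
    simp only [pvILT, Bool.or_eq_true, Bool.and_eq_true, decide_eq_true_eq]
    omega
  have hILTasym : ∀ a z : Int, pvILT f a z = true → pvILT f z a = false := by
    intro a z h
    simp only [pvILT, Bool.or_eq_true, Bool.and_eq_true, decide_eq_true_eq,
      Bool.or_eq_false_iff, Bool.and_eq_false_iff, decide_eq_false_iff_not, not_lt,
      Bool.not_eq_true', Bool.not_eq_false'] at *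
    omega
  have hILTirr : ∀ a : Int, pvILT f a a = false := by
    intro a; simp [pvILT]
  have hkey : ∀ j : Nat, j < g.length →
      (((j : Int) ∈ ord.take (((g.length : Int) - k).toNat)) ↔
        pvRank f g.length (pvElt f j) < ((g.length : Int) - k).toNat) := by
    intro j hj
    have hjord : (j : Int) ∈ ord := by
      rw [hperm.mem_iff]
      exact PySem.List.mem_pyRange_one.mpr ⟨by omega, by exact_mod_cast hj⟩
    have htm := pv_take_mem (pvILT f) hILTasym hILTirr ord hpILT (j : Int) hjord
      (((g.length : Int) - k).toNat)
    have hflen : (ord.filter (fun a => pvILT f a (j : Int))).length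
        = ((PySem.List.pyRange 0 ((g.length : Int))).filter (fun a => pvILT f a (j : Int))).length :=
      (hperm.filter _).length_eq
    have hrank : ((PySem.List.pyRange 0 ((g.length : Int))).filter (fun a => pvILT f a (j : Int))).length
        = pvRank f g.length (pvElt f j) := by
      rw [PySem.List.pyRange_zero_natCast g.length, List.filter_map]
      unfold pvRank pvW
      rw [List.filter_map, List.length_map, List.length_map]
      refine congrArg List.length (List.filter_congr ?_)
      intro a ha
      simp only [Function.comp_apply, pvILT, pvLT, pvElt, PySem.List.pyGetD_natCast,
        Nat.cast_lt]
      rfl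
    rw [htm, hflen, hrank]
  rw [PySem.List.pyRange_zero_natCast g.length, List.filter_map, List.map_map]
  unfold pvSel pvW
  rw [List.filter_map, List.map_map]
  have hfc : (List.range g.length).filter
        ((fun i => !(PySem.Set.contains (PySem.Set.ofList (ord.take (((g.length : Int) - k).toNat))) i)) ∘ (fun kk : Nat => (kk : Int)))
      = (List.range g.length).filter
        ((fun x => decide ((((g.length : Int) - k).toNat) ≤ pvRank f g.length x)) ∘ pvElt f) := by
    refine List.filter_congr ?_
    intro a ha
    have haN : a < g.length := List.mem_range.mp ha
    have hcontains : PySem.Set.contains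
        (PySem.Set.ofList (ord.take (((g.length : Int) - k).toNat))) (a : Int)
        = decide ((a : Int) ∈ ord.take (((g.length : Int) - k).toNat)) := by
      by_cases hmem : (a : Int) ∈ ord.take (((g.length : Int) - k).toNat)
      · simp [hmem]
      · simp only [hmem, decide_false]
        by_contra hcon
        have : PySem.Set.contains (PySem.Set.ofList (ord.take (((g.length : Int) - k).toNat))) (a : Int) = true := by
          cases hval : PySem.Set.contains (PySem.Set.ofList (ord.take (((g.length : Int) - k).toNat))) (a : Int)
          · exact absurd hval hcon
          · rfl
        exact hmem ((PySem.Set.mem_ofList _ _).mp ((PySem.Set.contains_iff _ _).mp this))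
    simp only [Function.comp_apply, hcontains]
    have hiff := hkey a haN
    by_cases hP : ((a : Int)) ∈ List.take (((g.length : Int) - k).toNat) ord
    · have hQ : ¬ ((g.length : Int) - k).toNat ≤ pvRank f g.length (pvElt f a) := by
        have := hiff.mp hP; omega
      simp [hP, hQ]
    · have hQ : ((g.length : Int) - k).toNat ≤ pvRank f g.length (pvElt f a) := by
        have hnr := hiff.mpr.mt hP
        omega
      simp [hP, hQ]
  rw [hfc]
  refine List.map_congr_left ?_
  intro a ha
  simp [pvElt, PySem.List.pyGetD_natCast]

-- ===== VERDICT (by name: the statement is the Claim_ definition above) =====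
theorem metodo_de_selecao_spec : Claim_equal_metodo_de_selecao := by
  intro f k g _hdom hpre
  unfold Spec_metodo_de_selecao
  by_cases hm : (g.length : Int) - k ≤ 0
  · have h0 : ((g.length : Int) - k).toNat = 0 := by omega
    rw [metodo_de_selecao, h0, metodo_de_selecao_alt]
    simp [hm]
    rfl
  · rcases hpre with h | ⟨hf, hk⟩
    · exact absurd h hm
    · rw [pvA_eq f g k hf hk, pvB_eq f g k (by omega)]
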